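-- pv_equiv track=rewrite | github.com/navjeet-py/Erdos | 27.py | check
-- ===== SOURCE A (Python) =====
-- def is_prime(x):
--     for i in range(2, x + 1):
--         if i * i > x:
--             return True
--         if x % i == 0:
--             return False
--
-- def check(x):
--     cnt = 0
--     for pp in range(11):
--         x = x * 3 + 2
--         if is_prime(x):
--             cnt += 1
--     if cnt == 11:
--         return True
--     else:
--         return False
-- ===== SOURCE B (Python) =====
-- def is_prime(x):
--     for i in range(2, x + 1):
--         if i * i > x:
--             return True
--         if x % i == 0:
--             return False
--
-- def check(x):
--     return all(is_prime(3 ** k * (x + 1) - 1) for k in range(1, 12))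
-- ===== Notes on version B (the rewrite author's own statement) =====
-- stated objective: simpler
-- what changed: check no longer mutates x through an 11-step loop with a prime counter; it tests the closed form 3**k*(x+1)-1 of the k-th iterate directly with all() over k=1..11.
import Mathlib
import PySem

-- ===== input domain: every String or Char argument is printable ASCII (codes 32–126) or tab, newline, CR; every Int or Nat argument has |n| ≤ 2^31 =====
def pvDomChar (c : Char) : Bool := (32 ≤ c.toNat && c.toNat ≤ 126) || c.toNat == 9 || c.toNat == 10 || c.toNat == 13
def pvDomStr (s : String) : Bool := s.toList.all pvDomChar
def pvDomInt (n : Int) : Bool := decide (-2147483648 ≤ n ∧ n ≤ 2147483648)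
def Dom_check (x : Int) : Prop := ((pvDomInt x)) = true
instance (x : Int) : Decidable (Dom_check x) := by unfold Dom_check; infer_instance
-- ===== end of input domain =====

-- B replaces A's 11-step mutation loop and prime counter by the closed form 3^k*(x+1)-1
-- for the k-th iterate, testing all k = 1..11 directly (objective: simpler; same cost).

-- ===== PORT A =====
-- for i in range(2, x+1): early-returning loop; fuel = len(range(2, x+1)) = (x-1).toNat.
-- Falling off the loop (only possible when x < 2) is Python's implicit 'return None' → none.
def isPrimeGo (x i : Int) : Nat → Option Bool
  | 0 => none
  | n + 1 =>
    if i * i > x then some true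
    else if PySem.Int.mod x i = 0 then some false
    else isPrimeGo x (i + 1) n

def is_prime (x : Int) : Option Bool := isPrimeGo x 2 (x - 1).toNat

-- 'if is_prime(x):' tests Python truthiness: None is falsy → (· ).getD false
def check (x : Int) : Bool :=
  let st := (List.range 11).foldl
    (fun (st : Int × Int) (_ : Nat) =>
      let x' := st.1 * 3 + 2
      (x', if (is_prime x').getD false then st.2 + 1 else st.2)) (x, 0)
  decide (st.2 = (11 : Int))

-- ===== PORT B =====
def check_alt (x : Int) : Bool :=
  (PySem.List.pyRange 1 12 1).all
    (fun k => (is_prime (3 ^ k.toNat * (x + 1) - 1)).getD false)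

-- ===== PRECONDITION & SPEC =====
def Spec_check (x : Int) (out : Bool) : Prop := out = check_alt x
instance (x : Int) (out : Bool) : Decidable (Spec_check x out) := by unfold Spec_check; infer_instance

-- ===== CLAIM (what is proved, stated in full; the proofs are below) =====
def Claim_equal_check : Prop := ∀ (x : Int), Dom_check x → Spec_check x (check x)

-- ===== LEMMAS AND PROOFS =====

-- indicator of the k-th tested value being truthy-prime
def pvInd (x : Int) (k : Nat) : Int :=
  if (is_prime (3 ^ k * (x + 1) - 1)).getD false then 1 else 0

-- A's fold state after n steps: current x is the n-th iterate in closed form,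
-- cnt is the sum of the indicators of iterates 1..n.
theorem fold_char (x : Int) (n : Nat) :
    (List.range n).foldl
      (fun (st : Int × Int) (_ : Nat) =>
        let x' := st.1 * 3 + 2
        (x', if (is_prime x').getD false then st.2 + 1 else st.2)) (x, 0)
      = (3 ^ n * (x + 1) - 1, ((List.range n).map (fun k => pvInd x (k + 1))).sum) := by
  induction n with
  | zero => simp
  | succ n ih =>
    rw [List.range_succ, List.foldl_append, ih, List.map_append, List.sum_append]
    have hx : (3 ^ n * (x + 1) - 1) * 3 + 2 = 3 ^ (n + 1) * (x + 1) - 1 := by ring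
    simp [pvInd, hx]
    split <;> simp

theorem check_spec : Claim_equal_check := by
  intro x _
  unfold Spec_check check check_alt
  rw [fold_char]
  have hr : PySem.List.pyRange 1 12 1 = [1,2,3,4,5,6,7,8,9,10,11] := by decide
  rw [hr]
  norm_num [List.range_succ, pvInd, List.all_cons, List.all_nil]
  simp only [show (((2:Int)).toNat) = 2 from rfl, show (((3:Int)).toNat) = 3 from rfl, show (((4:Int)).toNat) = 4 from rfl, show (((5:Int)).toNat) = 5 from rfl, show (((6:Int)).toNat) = 6 from rfl, show (((7:Int)).toNat) = 7 from rfl, show (((8:Int)).toNat) = 8 from rfl, show (((9:Int)).toNat) = 9 from rfl, show (((10:Int)).toNat) = 10 from rfl, show (((11:Int)).toNat) = 11 from rfl]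
  norm_num
  generalize (is_prime (3 * (x + 1) - 1)).getD false = t1
  generalize (is_prime (9 * (x + 1) - 1)).getD false = t2
  generalize (is_prime (27 * (x + 1) - 1)).getD false = t3
  generalize (is_prime (81 * (x + 1) - 1)).getD false = t4
  generalize (is_prime (243 * (x + 1) - 1)).getD false = t5
  generalize (is_prime (729 * (x + 1) - 1)).getD false = t6
  generalize (is_prime (2187 * (x + 1) - 1)).getD false = t7
  generalize (is_prime (6561 * (x + 1) - 1)).getD false = t8
  generalize (is_prime (19683 * (x + 1) - 1)).getD false = t9
  generalize (is_prime (59049 * (x + 1) - 1)).getD false = t10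
  generalize (is_prime (177147 * (x + 1) - 1)).getD false = t11
  revert t1 t2 t3 t4 t5 t6 t7 t8 t9 t10 t11
  decide
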